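-- pv_equiv track=rewrite | github.com/umutacar/DC | test_atom_parser_bert.py | find_sentence_index
-- ===== SOURCE A (Python) =====
-- def sentence_indices(sentences):
-- 	sentences_length = list(map(lambda x: len(x) + 1, sentences)) # +1 for the '.'
-- 	cumulative_sentence_length_list = []
-- 	cumulative_length = 0
-- 	for length in sentences_length:
-- 		cumulative_sentence_length_list.append(cumulative_length)
-- 		cumulative_length += length
-- 	return cumulative_sentence_length_list
--
-- def find_sentence_index(atom, index):
-- 	sentence_length = sentence_indices(atom.strip().split('.'))
-- 	if (index == 0):
-- 		return 0
-- 	elif (index >= sentence_length[-1]):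
-- 		return len(sentence_length) - 1
-- 	i = 0
-- 	while (sentence_length[i] <= index):
-- 		i+=1
-- 	return i - 1
-- ===== SOURCE B (Python) =====
-- def find_sentence_index(atom, index):
-- 	count = 0
-- 	total = 0
-- 	for sentence in atom.strip().split('.'):
-- 		if total <= index:
-- 			count += 1
-- 		total += len(sentence) + 1
-- 	return count - 1
-- ===== Notes on version B (the rewrite author's own statement) =====
-- stated objective: simpler
-- what changed: B drops A's cumulative-start table, the index==0 and index>=last special cases and the second linear scan, and instead counts in one pass over the split pieces how many sentence start offsets are <= index, returning that count minus one.
import Mathlib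
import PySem

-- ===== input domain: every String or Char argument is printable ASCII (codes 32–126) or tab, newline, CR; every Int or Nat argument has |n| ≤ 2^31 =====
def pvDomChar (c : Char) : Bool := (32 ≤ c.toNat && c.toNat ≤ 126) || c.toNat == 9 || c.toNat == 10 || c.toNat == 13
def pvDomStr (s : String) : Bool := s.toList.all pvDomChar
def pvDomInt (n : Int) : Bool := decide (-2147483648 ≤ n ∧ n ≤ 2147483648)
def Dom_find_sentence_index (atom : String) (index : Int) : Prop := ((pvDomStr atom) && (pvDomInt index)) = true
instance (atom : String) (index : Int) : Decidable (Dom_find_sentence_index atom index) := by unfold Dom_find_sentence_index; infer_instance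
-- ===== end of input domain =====

-- B replaces A's cumulative-start table, two special cases and linear re-scan by a single
-- pass with two counters (simpler; same return value on every input).

-- ===== PORT A =====
-- literal port of sentence_indices: for-loop appending the running cumulative length
def pvSentenceIndices (sentences : List String) : List Int :=
  let sentencesLength := sentences.map (fun x => PySem.Str.len x + 1)
  (sentencesLength.foldl
    (fun (st : List Int × Int) length => (st.1 ++ [st.2], st.2 + length)) ([], 0)).1

-- literal port of the while-loop `while sentence_length[i] <= index: i += 1` / `return i - 1`.
-- On list exhaustion Python would raise IndexError; that is unreachable (the loop is only
-- entered when index < sentence_length[-1], so some entry exceeds index before the end).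
def pvScanA : List Int → Int → Int → Int
  | [], i, _ => i - 1
  | c :: rest, i, index => if c ≤ index then pvScanA rest (i + 1) index else i - 1

def find_sentence_index (atom : String) (index : Int) : Int :=
  let sentence_length :=
    pvSentenceIndices ((PySem.Str.split? (PySem.Str.strip atom) ".").getD [])
  if index = 0 then 0
  -- sentence_length[-1]: the list is never empty (split yields ≥ 1 piece), so .getD 0 is unreachable
  else if index ≥ (PySem.List.pyGet? sentence_length (-1)).getD 0 then
    (sentence_length.length : Int) - 1
  else pvScanA sentence_length 0 index

-- ===== PORT B =====
def find_sentence_index_alt (atom : String) (index : Int) : Int :=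
  let st := ((PySem.Str.split? (PySem.Str.strip atom) ".").getD []).foldl
    (fun (st : Int × Int) sentence =>
      ((if st.2 ≤ index then st.1 + 1 else st.1), st.2 + PySem.Str.len sentence + 1))
    (0, 0)
  st.1 - 1

-- ===== PRECONDITION & SPEC =====
def Spec_find_sentence_index (atom : String) (index : Int) (out : Int) : Prop := out = find_sentence_index_alt atom index
instance (atom : String) (index : Int) (out : Int) : Decidable (Spec_find_sentence_index atom index out) := by unfold Spec_find_sentence_index; infer_instance

-- ===== CLAIM (what is proved, stated in full; the proofs are below) =====
def Claim_equal_find_sentence_index : Prop := ∀ (atom : String) (index : Int), Dom_find_sentence_index atom index → Spec_find_sentence_index atom index (find_sentence_index atom index)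

-- ===== LEMMAS AND PROOFS =====

-- cumulative start positions of the pieces, starting at t (what pvSentenceIndices builds)
def pvCum (t : Int) : List Int → List Int
  | [] => []
  | l :: ls => t :: pvCum (t + l) ls

-- number of start positions ≤ index along the lengths list, starting at t (what B counts)
def pvBcnt (index : Int) (t : Int) : List Int → Int
  | [] => 0
  | l :: ls => (if t ≤ index then 1 else 0) + pvBcnt index (t + l) ls

theorem pv_getLast_cons {α : Type} (a : α) (l : List α) (h : l ≠ []) :
    (a :: l).getLast? = l.getLast? := by
  cases l with
  | nil => exact absurd rfl h
  | cons b l => rfl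

theorem pvCum_length (ls : List Int) : ∀ t, (pvCum t ls).length = ls.length := by
  induction ls with
  | nil => intro t; rfl
  | cons l ls ih => intro t; simp [pvCum, ih]

theorem pvCum_ne_nil (ls : List Int) (t : Int) (h : ls ≠ []) : pvCum t ls ≠ [] := by
  cases ls with
  | nil => exact absurd rfl h
  | cons l ls => simp [pvCum]

theorem pvFoldA (ls : List Int) : ∀ (acc : List Int) (t : Int),
    ls.foldl (fun (st : List Int × Int) length => (st.1 ++ [st.2], st.2 + length)) (acc, t)
      = (acc ++ pvCum t ls, t + ls.sum) := by
  induction ls with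
  | nil => intro acc t; simp [pvCum]
  | cons l ls ih => intro acc t; simp [pvCum, ih, List.append_assoc]; omega

theorem pvFoldB (index : Int) (parts : List String) : ∀ (c t : Int),
    (parts.foldl
      (fun (st : Int × Int) sentence =>
        ((if st.2 ≤ index then st.1 + 1 else st.1), st.2 + PySem.Str.len sentence + 1))
      (c, t)).1
      = c + pvBcnt index t (parts.map (fun s => PySem.Str.len s + 1)) := by
  induction parts with
  | nil => intro c t; simp [pvBcnt]
  | cons p parts ih =>
    intro c t
    simp only [List.foldl_cons, List.map_cons, pvBcnt, ih, ← add_assoc]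
    split_ifs <;> omega

theorem pvBcnt_zero (index : Int) (ls : List Int) : ∀ t, (∀ l ∈ ls, 1 ≤ l) → index < t →
    pvBcnt index t ls = 0 := by
  induction ls with
  | nil => intro t _ _; rfl
  | cons l ls ih =>
    intro t h ht
    have hl : 1 ≤ l := h l (by simp)
    have := ih (t + l) (fun x hx => h x (by simp [hx])) (by omega)
    simp [pvBcnt, this]
    omega

theorem pvScan_eq (index : Int) (ls : List Int) : ∀ (t i : Int), (∀ l ∈ ls, 1 ≤ l) →
    pvScanA (pvCum t ls) i index = i + pvBcnt index t ls - 1 := by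
  induction ls with
  | nil => intro t i _; simp [pvCum, pvScanA, pvBcnt]
  | cons l ls ih =>
    intro t i h
    have htail : ∀ x ∈ ls, 1 ≤ x := fun x hx => h x (by simp [hx])
    by_cases ht : t ≤ index
    · simp only [pvCum, pvScanA, pvBcnt, if_pos ht, ih (t + l) (i + 1) htail]
      omega
    · have hl : 1 ≤ l := h l (by simp)
      have h0 := pvBcnt_zero index ls (t + l) htail (by omega)
      simp [pvCum, pvScanA, pvBcnt, ht, h0]

theorem pvCum_getLast_ge (ls : List Int) : ∀ t, (∀ l ∈ ls, 1 ≤ l) → ls ≠ [] →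
    t ≤ ((pvCum t ls).getLast?).getD 0 := by
  induction ls with
  | nil => intro t _ h; exact absurd rfl h
  | cons l ls ih =>
    intro t h _
    cases ls with
    | nil => simp [pvCum]
    | cons l' ls' =>
      have hl : 1 ≤ l := h l (by simp)
      have hrec := ih (t + l) (fun x hx => h x (by simp [hx])) (by simp)
      have hne := pvCum_ne_nil (l' :: ls') (t + l) (by simp)
      rw [show pvCum t (l :: l' :: ls') = t :: pvCum (t + l) (l' :: ls') from rfl,
        pv_getLast_cons _ _ hne]
      omega

theorem pvBcnt_all (index : Int) (ls : List Int) : ∀ t, (∀ l ∈ ls, 1 ≤ l) → ls ≠ [] →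
    ((pvCum t ls).getLast?).getD 0 ≤ index → pvBcnt index t ls = ls.length := by
  induction ls with
  | nil => intro t _ h; exact absurd rfl h
  | cons l ls ih =>
    intro t h _ hlast
    cases ls with
    | nil =>
      simp [pvCum] at hlast
      simp [pvBcnt, hlast]
    | cons l' ls' =>
      have hl : 1 ≤ l := h l (by simp)
      have htail : ∀ x ∈ (l' :: ls'), 1 ≤ x := fun x hx => h x (by simp [hx])
      have hne := pvCum_ne_nil (l' :: ls') (t + l) (by simp)
      rw [show pvCum t (l :: l' :: ls') = t :: pvCum (t + l) (l' :: ls') from rfl,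
        pv_getLast_cons _ _ hne] at hlast
      have ht : t ≤ index :=
        le_trans (le_trans (by omega : t ≤ t + l)
          (pvCum_getLast_ge (l' :: ls') (t + l) htail (by simp))) hlast
      have hrec := ih (t + l) htail (by simp) hlast
      have hstep : pvBcnt index t (l :: l' :: ls') = 1 + pvBcnt index (t + l) (l' :: ls') := by
        simp [pvBcnt, ht]
      rw [hstep, hrec]
      simp
      omega

theorem pv_pyGet_neg_one {α : Type} (xs : List α) (h : xs ≠ []) :
    PySem.List.pyGet? xs (-1) = xs.getLast? := by
  have hlen : 0 < xs.length := List.length_pos_iff.mpr h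
  unfold PySem.List.pyGet? PySem.List.pyIdx?
  rw [if_neg (by omega), if_pos (by omega)]
  simp [List.getLast?_eq_getElem?]

theorem pv_splitOn_go_ne_nil (sep : List Char) : ∀ (fuel : Nat) (l cur : List Char)
    (acc : List (List Char)), PySem.Chars.splitOn.go sep fuel l cur acc ≠ [] := by
  intro fuel
  induction fuel with
  | zero => intro l cur acc; simp [PySem.Chars.splitOn.go]
  | succ n ih =>
    intro l cur acc
    cases l with
    | nil => simp [PySem.Chars.splitOn.go]
    | cons c rest =>
      simp only [PySem.Chars.splitOn.go]
      split_ifs <;> apply ih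

theorem pv_split_ne_nil (s : String) :
    (PySem.Str.split? s ".").getD [] ≠ [] := by
  simp [PySem.Str.split?, PySem.Chars.split?, PySem.Chars.splitOn, List.isEmpty]
  exact pv_splitOn_go_ne_nil _ _ _ _ _

-- the whole of A's branch structure, on an arbitrary positive lengths list
theorem pv_main (index : Int) (ls : List Int) (hpos : ∀ l ∈ ls, 1 ≤ l) (hne : ls ≠ []) :
    (if index = 0 then 0
     else if index ≥ (PySem.List.pyGet? (pvCum 0 ls) (-1)).getD 0 then
       ((pvCum 0 ls).length : Int) - 1
     else pvScanA (pvCum 0 ls) 0 index)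
      = pvBcnt index 0 ls - 1 := by
  by_cases h0 : index = 0
  · rw [if_pos h0]
    subst h0
    obtain ⟨l, ls', rfl⟩ := List.exists_cons_of_ne_nil hne
    have hl : 1 ≤ l := hpos l (by simp)
    have hz := pvBcnt_zero 0 ls' (0 + l) (fun x hx => hpos x (by simp [hx])) (by omega)
    have hstep : pvBcnt 0 0 (l :: ls') = 1 + pvBcnt 0 (0 + l) ls' := by simp [pvBcnt]
    rw [hstep, hz]
    omega
  · rw [if_neg h0, pv_pyGet_neg_one _ (pvCum_ne_nil ls 0 hne)]
    by_cases hlast : index ≥ ((pvCum 0 ls).getLast?).getD 0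
    · rw [if_pos hlast, pvBcnt_all index ls 0 hpos hne hlast, pvCum_length]
    · rw [if_neg hlast, pvScan_eq index ls 0 0 hpos]
      omega

-- ===== VERDICT (by name: the statement is the Claim_ definition above) =====
theorem find_sentence_index_spec : Claim_equal_find_sentence_index := by
  intro atom index _
  unfold Spec_find_sentence_index find_sentence_index find_sentence_index_alt pvSentenceIndices
  have hne : (PySem.Str.split? (PySem.Str.strip atom) ".").getD [] ≠ [] :=
    pv_split_ne_nil _
  have hpos : ∀ l ∈ ((PySem.Str.split? (PySem.Str.strip atom) ".").getD []).map
      (fun s => PySem.Str.len s + 1), 1 ≤ l := by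
    intro l hl
    obtain ⟨s, _, rfl⟩ := List.mem_map.mp hl
    have := PySem.Str.len_eq s
    omega
  simp only [pvFoldA, pvFoldB, List.nil_append, zero_add]
  exact pv_main index _ hpos (by simpa using hne)
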